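-- pv_equiv track=rewrite | github.com/markalbrand56/Frequency-Distribution_Statistics | s_package/c_intervals.py | limits
-- ===== SOURCE A (Python) =====
-- def limits(min,max,cls):
--     i = cls - 1
--     l_lst = []
--     for x in range(int(min),int(max)):
--         t_lim = (min,min + i)
--         l_lst.append(t_lim)
--         min += i
--     return (l_lst)
-- ===== SOURCE B (Python) =====
-- def limits(min, max, cls):
--     i = cls - 1
--     n = int(max) - int(min)
--     return [(min + k * i, min + (k + 1) * i) for k in range(n)]
-- ===== Notes on version B (the rewrite author's own statement) =====
-- stated objective: alternative
-- what changed: B replaces A's stateful loop that mutates min while appending tuples by a closed-form comprehension computing the k-th interval directly as (min + k*i, min + (k+1)*i).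
import Mathlib
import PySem

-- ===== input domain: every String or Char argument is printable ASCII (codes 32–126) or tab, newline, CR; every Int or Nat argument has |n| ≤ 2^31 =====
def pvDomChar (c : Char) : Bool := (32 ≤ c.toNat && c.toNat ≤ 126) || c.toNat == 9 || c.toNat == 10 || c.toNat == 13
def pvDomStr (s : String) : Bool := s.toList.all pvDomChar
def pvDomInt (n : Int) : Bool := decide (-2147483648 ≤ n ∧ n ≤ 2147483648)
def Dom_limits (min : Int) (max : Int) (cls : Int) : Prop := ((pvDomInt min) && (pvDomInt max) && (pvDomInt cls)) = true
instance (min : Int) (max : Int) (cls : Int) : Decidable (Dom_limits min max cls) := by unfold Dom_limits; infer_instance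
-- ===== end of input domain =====

-- B replaces A's stateful fold (mutating min) by a closed-form comprehension for the k-th interval.


-- ===== PORT A =====
-- A: loop over range(int(min), int(max)), append (min, min+i) and mutate min += i
def limits (min : Int) (max : Int) (cls : Int) : List (Int × Int) :=
  let i := cls - 1
  let st := (PySem.List.pyRange min max 1).foldl
    (fun (s : Int × List (Int × Int)) _ => (s.1 + i, s.2 ++ [(s.1, s.1 + i)]))
    (min, [])
  st.2

-- ===== PORT B =====
-- B: closed-form comprehension, k-th interval computed directly from k
def limits_alt (min : Int) (max : Int) (cls : Int) : List (Int × Int) :=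
  let i := cls - 1
  let n := max - min
  (PySem.List.pyRange 0 n 1).map (fun k => (min + k * i, min + (k + 1) * i))

-- ===== PRECONDITION & SPEC =====
def Spec_limits (min : Int) (max : Int) (cls : Int) (out : List (Int × Int)) : Prop := out = limits_alt min max cls
instance (min : Int) (max : Int) (cls : Int) (out : List (Int × Int)) : Decidable (Spec_limits min max cls out) := by unfold Spec_limits; infer_instance

-- ===== CLAIM =====
def Claim_equal_limits : Prop := ∀ (min : Int) (max : Int) (cls : Int), Dom_limits min max cls → Spec_limits min max cls (limits min max cls)

-- ===== LEMMAS AND PROOFS =====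

-- the list A's loop produces in n iterations starting at c
def chainA (i : Int) : Int → Nat → List (Int × Int)
  | _, 0 => []
  | c, n+1 => (c, c + i) :: chainA i (c + i) n

theorem foldl_const {α β : Type} (f : β → β) (s : β) (l : List α) :
    l.foldl (fun b _ => f b) s = f^[l.length] s := by
  induction l generalizing s with
  | nil => rfl
  | cons a t ih => simp [List.foldl, ih, Function.iterate_succ_apply]

theorem iterA (i : Int) (n : Nat) : ∀ (c : Int) (acc : List (Int × Int)),
    (fun (s : Int × List (Int × Int)) => (s.1 + i, s.2 ++ [(s.1, s.1 + i)]))^[n] (c, acc)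
      = (c + n * i, acc ++ chainA i c n) := by
  induction n with
  | zero => intro c acc; simp [chainA]
  | succ m ih =>
      intro c acc
      rw [Function.iterate_succ_apply, ih]
      simp [chainA]
      ring

theorem chainA_closed (i : Int) (n : Nat) : ∀ (c : Int),
    chainA i c n = (List.range n).map (fun k : Nat => ((c + (k : Int) * i, c + ((k : Int) + 1) * i) : Int × Int)) := by
  induction n with
  | zero => intro c; simp [chainA]
  | succ m ih =>
      intro c
      rw [List.range_succ_eq_map]
      simp only [List.map_cons, List.map_map, chainA, ih (c + i)]
      congr 1
      · simp
      · apply List.map_congr_left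
        intro k _
        simp only [Function.comp]
        rw [Prod.mk.injEq]
        constructor <;> push_cast <;> ring

-- ===== VERDICT =====
theorem limits_spec : Claim_equal_limits := by
  intro min max cls _
  unfold Spec_limits limits limits_alt
  simp only [foldl_const, PySem.List.length_pyRange_one]
  rw [iterA]
  rw [PySem.List.pyRange_one]
  simp only [List.nil_append, sub_zero, List.map_map]
  rw [chainA_closed]
  apply List.map_congr_left
  intro k _
  simp [Function.comp]
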